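-- pv_equiv track=rewrite | github.com/posl/comment_recommendation | script/mod_gen/3_time/en/286_B/6.py | f
-- ===== SOURCE A (Python) =====
-- def f(N,S):
--     if N < 2:
--         return S
--     elif N == 2:
--         if S == 'na':
--             return 'nya'
--         else:
--             return S
--     else:
--         if S[0:2] == 'na':
--             return 'nya' + f(N-2, S[2:])
--         else:
--             return S[0] + f(N-1, S[1:])
-- ===== SOURCE B (Python) =====
-- def f(N, S):
--     parts = []
--     n, s = N, S
--     while n >= 3:
--         if s[0:2] == 'na':
--             parts.append('nya')
--             s = s[2:]
--             n -= 2
--         else: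
--             parts.append(s[0])
--             s = s[1:]
--             n -= 1
--     if n == 2 and s == 'na':
--         parts.append('nya')
--     else:
--         parts.append(s)
--     return ''.join(parts)
-- ===== Notes on version B (the rewrite author's own statement) =====
-- stated objective: alternative
-- what changed: Replaced A's recursion (which rebuilds a string at every level via repeated concatenation) with an explicit while-loop threading a running (n, s) pair and appending pieces to a list joined once at the end.
-- outside the precondition, e.g. on f(5, 'na'): A raises IndexError, B raises IndexError
import Mathlib
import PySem

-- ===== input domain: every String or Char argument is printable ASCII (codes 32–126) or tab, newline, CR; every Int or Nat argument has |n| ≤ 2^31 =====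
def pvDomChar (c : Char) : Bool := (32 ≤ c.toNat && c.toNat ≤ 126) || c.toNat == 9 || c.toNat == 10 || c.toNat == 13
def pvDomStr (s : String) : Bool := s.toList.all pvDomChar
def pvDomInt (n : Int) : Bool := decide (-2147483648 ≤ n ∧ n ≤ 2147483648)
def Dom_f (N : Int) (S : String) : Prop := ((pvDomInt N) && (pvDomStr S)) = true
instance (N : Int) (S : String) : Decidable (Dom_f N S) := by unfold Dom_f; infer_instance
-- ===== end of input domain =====

-- B replaces A's recursion by an explicit loop threading (n, s) and a list of pieces joined once at the end (objective: alternative decomposition; it avoids A's per-level string re-concatenation).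

-- ===== PORT A =====
-- A's recursion, transliterated on List Char (the String wrapper is below).
-- The `none` branch of pyGet? is Python's IndexError (N ≥ len(S)+3), excluded by Pre_f.
def fCore (N : Int) (s : List Char) : List Char :=
  if N < 2 then s
  else if N = 2 then (if s = ['n','a'] then ['n','y','a'] else s)
  else if PySem.List.slice s (some 0) (some 2) = ['n','a'] then
    ['n','y','a'] ++ fCore (N-2) (PySem.List.slice s (some 2) none)
  else
    match PySem.List.pyGet? s 0 with
    | some c => c :: fCore (N-1) (PySem.List.slice s (some 1) none)
    | none => []
termination_by N.toNat
decreasing_by all_goals omega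

def f (N : Int) (S : String) : String := String.ofList (fCore N S.toList)

-- ===== PORT B =====
-- The while-loop of Source B: one step per iteration, appending pieces to `parts` (acc);
-- at exit it appends the tail piece exactly as Source B does after the loop.
-- The `none` branch is Source B's IndexError (same inputs), excluded by Pre_f.
def fAltLoop (n : Int) (s : List Char) (acc : List (List Char)) : List (List Char) :=
  if 3 ≤ n then
    if PySem.List.slice s (some 0) (some 2) = ['n','a'] then
      fAltLoop (n-2) (PySem.List.slice s (some 2) none) (acc ++ [['n','y','a']])
    else
      match PySem.List.pyGet? s 0 with
      | some c => fAltLoop (n-1) (PySem.List.slice s (some 1) none) (acc ++ [[c]])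
      | none => acc
  else
    acc ++ [if n = 2 ∧ s = ['n','a'] then ['n','y','a'] else s]
termination_by n.toNat
decreasing_by all_goals omega

def f_alt (N : Int) (S : String) : String :=
  String.ofList (PySem.Chars.join [] (fAltLoop N S.toList []))

-- ===== PRECONDITION & SPEC =====
-- Pre_f excludes exactly the inputs where Python A raises IndexError (S[0] on an
-- exhausted string, i.e. N ≥ len(S)+3); B raises IndexError there too.
def Pre_f (N : Int) (S : String) : Prop := N ≤ (PySem.Str.len S : Int) + 2
instance (N : Int) (S : String) : Decidable (Pre_f N S) := by unfold Pre_f; infer_instance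

def pvWitness_f : Int × String := (4, "nana")

def Spec_f (N : Int) (S : String) (out : String) : Prop := out = f_alt N S
instance (N : Int) (S : String) (out : String) : Decidable (Spec_f N S out) := by unfold Spec_f; infer_instance

-- ===== CLAIM (what is proved, stated in full; the proofs are below) =====
def Claim_equal_f : Prop := ∀ (N : Int) (S : String), Dom_f N S → Pre_f N S → Spec_f N S (f N S)

-- ===== LEMMAS AND PROOFS =====

lemma join_nil_eq_flatten (ps : List (List Char)) : PySem.Chars.join [] ps = ps.flatten := by
  induction ps with
  | nil => rfl
  | cons p ps ih =>
    cases ps with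
    | nil => simp [PySem.Chars.join, List.intercalate]
    | cons q qs => simpa [PySem.Chars.join_cons_cons] using ih

-- loop exit (n < 3): B appends the tail piece, which is exactly A's base-case value
lemma exit_eq (n : Int) (s : List Char) (acc : List (List Char)) (h3 : ¬ 3 ≤ n) :
    (fAltLoop n s acc).flatten = acc.flatten ++ fCore n s := by
  have hcore : fCore n s = (if n = 2 ∧ s = ['n','a'] then ['n','y','a'] else s) := by
    by_cases h2 : n < 2
    · rw [fCore, if_pos h2,
        if_neg (show ¬ (n = 2 ∧ s = ['n','a']) from fun h => absurd h.1 (by omega))]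
    · have hn2 : n = 2 := by omega
      subst hn2
      rw [fCore, if_neg (show ¬ (2:Int) < 2 by omega), if_pos (show (2:Int) = 2 from rfl)]
      by_cases hs : s = ['n','a']
      · rw [if_pos hs, if_pos (show (2:Int) = 2 ∧ s = ['n','a'] from ⟨rfl, hs⟩)]
      · rw [if_neg hs, if_neg (show ¬ ((2:Int) = 2 ∧ s = ['n','a']) from fun h => hs h.2)]
  rw [fAltLoop, if_neg h3, hcore]
  simp

-- loop invariant: under Pre_, B's loop concatenates to exactly A's recursive result
lemma loop_eq (k : Nat) : ∀ (n : Int), n.toNat ≤ k → ∀ (s : List Char) (acc : List (List Char)),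
    n ≤ (s.length : Int) + 2 →
    (fAltLoop n s acc).flatten = acc.flatten ++ fCore n s := by
  induction k with
  | zero =>
    intro n hn s acc _
    exact exit_eq n s acc (by omega)
  | succ k ih =>
    intro n hn s acc hpre
    by_cases h3 : 3 ≤ n
    · rw [fAltLoop, if_pos h3, fCore, if_neg (show ¬ n < 2 by omega),
        if_neg (show ¬ n = 2 by omega)]
      by_cases hna : PySem.List.slice s (some 0) (some 2) = ['n','a']
      · have hlen2 : 2 ≤ s.length := by
          by_contra hlt
          rw [PySem.List.slice_zero_start, show ((2:Int)) = ((2:Nat):Int) from rfl,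
            PySem.List.slice_to_natCast] at hna
          have := congrArg List.length hna
          simp [List.length_take] at this
          omega
        have hdrop : PySem.List.slice s (some 2) none = s.drop 2 := by
          rw [show ((2:Int)) = ((2:Nat):Int) from rfl, PySem.List.slice_from_natCast]
        rw [if_pos hna, if_pos hna, hdrop,
          ih (n-2) (by omega) (s.drop 2) _ (by simp; omega)]
        simp
      · obtain ⟨c, t, rfl⟩ : ∃ c t, s = c :: t := by
          cases s with
          | nil => exact absurd (by simpa using hpre) (by omega)
          | cons c t => exact ⟨c, t, rfl⟩
        have hget : PySem.List.pyGet? (c :: t) (0 : Int) = some c := by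
          simp
        have htail : PySem.List.slice (c :: t) (some 1) none = t := by
          rw [show ((1:Int)) = ((1:Nat):Int) from rfl, PySem.List.slice_from_natCast]
          rfl
        rw [if_neg hna, if_neg hna, hget]
        simp only [htail]
        rw [ih (n-1) (by omega) t (acc ++ [[c]]) (by simp at hpre; omega)]
        simp
    · exact exit_eq n s acc h3

-- ===== VERDICT (by name: the statement is the Claim_ definition above) =====
theorem f_spec : Claim_equal_f := by
  intro N S _ hpre
  unfold Spec_f f f_alt
  rw [join_nil_eq_flatten,
    loop_eq N.toNat N le_rfl S.toList [] (by simpa [Pre_f] using hpre)]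
  simp
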